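-- pv_equiv track=rewrite | github.com/Ford-z/Nowcoder | 排位赛/牛牛的独特子序列.py | check
-- ===== SOURCE A (Python) =====
-- def check(mid,x):
--     n=len(x)
--     a=0
--     b=0
--     c=0
--     for i in range(n):
--         if a<mid:
--             if x[i]=='a':
--                 a+=1
--         elif b<mid:
--             if x[i]=='b':
--                 b+=1
--         elif c<mid:
--             if x[i]=='c':
--                 c+=1
--     return c>=mid
-- ===== SOURCE B (Python) =====
-- def _lower(pref, t):
--     # least index k with pref[k] >= t (pref nondecreasing), or len(pref) if none
--     lo, hi = 0, len(pref)
--     while lo < hi: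
--         m = (lo + hi) // 2
--         if pref[m] >= t:
--             hi = m
--         else:
--             lo = m + 1
--     return lo
--
-- def check(mid, x):
--     n = len(x)
--     pa, pb, pc = [0], [0], [0]
--     for ch in x:
--         pa.append(pa[-1] + (ch == 'a'))
--         pb.append(pb[-1] + (ch == 'b'))
--         pc.append(pc[-1] + (ch == 'c'))
--     i = _lower(pa, mid)
--     if i > n:
--         return False
--     j = _lower(pb, pb[i] + mid)
--     if j > n:
--         return False
--     return pc[n] - pc[j] >= mid
-- ===== Notes on version B (the rewrite author's own statement) =====
-- stated objective: alternative
-- what changed: Replaced A's single-pass three-counter phase state machine with a precomputed prefix-count array per character and hand-written binary searches that locate the two phase boundaries, then a constant-time count comparison for the third phase.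
import Mathlib
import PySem

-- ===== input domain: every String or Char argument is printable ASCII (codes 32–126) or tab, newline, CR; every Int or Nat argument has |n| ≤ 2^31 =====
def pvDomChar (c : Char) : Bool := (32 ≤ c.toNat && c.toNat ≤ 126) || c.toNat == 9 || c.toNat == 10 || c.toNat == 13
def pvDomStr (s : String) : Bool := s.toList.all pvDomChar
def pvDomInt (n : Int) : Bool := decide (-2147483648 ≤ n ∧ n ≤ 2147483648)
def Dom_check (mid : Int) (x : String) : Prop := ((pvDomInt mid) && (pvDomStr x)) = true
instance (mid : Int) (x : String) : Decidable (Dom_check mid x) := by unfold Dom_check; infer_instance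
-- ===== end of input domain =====

-- B replaces A's single-pass three-counter state machine by three prefix-count arrays
-- built once, with the two phase boundaries located by binary search (objective: alternative).

-- ===== PORT A =====
-- A's loop body: one step of the phase state machine over counters (a, b, c).
def checkStep (mid : Int) (s : Int × Int × Int) (ch : Char) : Int × Int × Int :=
  match s with
  | (a, b, c) =>
    if a < mid then (if ch == 'a' then (a + 1, b, c) else (a, b, c))
    else if b < mid then (if ch == 'b' then (a, b + 1, c) else (a, b, c))
    else if c < mid then (if ch == 'c' then (a, b, c + 1) else (a, b, c))
    else (a, b, c)

def check (mid : Int) (x : String) : Bool :=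
  let s := x.toList.foldl (checkStep mid) (0, 0, 0)
  decide (s.2.2 ≥ mid)

-- ===== PORT B =====
-- B's prefix-building loop body: append running counts of 'a'/'b'/'c' (pa[-1] etc. are
-- always in range — the lists start as [0] and only grow — so .getD 0 never fires).
def prefStep (s : List Int × List Int × List Int) (ch : Char) : List Int × List Int × List Int :=
  ( s.1 ++ [(PySem.List.pyGet? s.1 (-1)).getD 0 + (if ch == 'a' then 1 else 0)],
    s.2.1 ++ [(PySem.List.pyGet? s.2.1 (-1)).getD 0 + (if ch == 'b' then 1 else 0)],
    s.2.2 ++ [(PySem.List.pyGet? s.2.2 (-1)).getD 0 + (if ch == 'c' then 1 else 0)] )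

-- B's `while lo < hi` binary-search loop (pref[m] with 0 ≤ lo ≤ m < hi ≤ len(pref) is
-- always in range, so .getD 0 never fires).
def lowerAux (pref : List Int) (t lo hi : Int) : Int :=
  if h : lo < hi then
    let m := PySem.Int.floordiv (lo + hi) 2
    if (PySem.List.pyGet? pref m).getD 0 ≥ t then lowerAux pref t lo m
    else lowerAux pref t (m + 1) hi
  else lo
termination_by (hi - lo).toNat
decreasing_by
  · have := PySem.Int.floordiv_lt_iff_lt_mul (a := lo + hi) (q := hi) (b := 2) (by omega)
    omega
  · have := PySem.Int.le_floordiv_iff_mul_le (a := lo + hi) (q := lo) (b := 2) (by omega)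
    omega

-- B's _lower(pref, t)
def lower (pref : List Int) (t : Int) : Int :=
  lowerAux pref t 0 (PySem.List.len pref)

def check_alt (mid : Int) (x : String) : Bool :=
  let n : Int := PySem.List.len x.toList
  let p := x.toList.foldl prefStep ([0], [0], [0])
  let i := lower p.1 mid
  if i > n then false
  else
    let j := lower p.2.1 ((PySem.List.pyGet? p.2.1 i).getD 0 + mid)
    if j > n then false
    else decide ((PySem.List.pyGet? p.2.2 n).getD 0 - (PySem.List.pyGet? p.2.2 j).getD 0 ≥ mid)

-- ===== PRECONDITION & SPEC =====
def Spec_check (mid : Int) (x : String) (out : Bool) : Prop := out = check_alt mid x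
instance (mid : Int) (x : String) (out : Bool) : Decidable (Spec_check mid x out) := by unfold Spec_check; infer_instance

-- ===== CLAIM (what is proved, stated in full; the proofs are below) =====
def Claim_equal_check : Prop := ∀ (mid : Int) (x : String), Dom_check mid x → Spec_check mid x (check mid x)

-- ===== LEMMAS AND PROOFS =====

-- Proof-only model of greedy consumption: advance through the stream until `count`
-- reaches `mid`, returning the rest, or none if exhausted.
def consume (mid : Int) (ch : Char) (count : Int) (xs : List Char) : Option (List Char) :=
  if count < mid then
    match xs with
    | [] => none
    | y :: rest => consume mid ch (if y == ch then count + 1 else count) rest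
  else
    some xs
termination_by xs

-- Phase C: with a, b saturated, A's remaining fold reaches c ≥ mid iff consume 'c' succeeds.
theorem phaseC (mid : Int) (xs : List Char) (c : Int) (hc : c ≤ mid) :
    ((xs.foldl (checkStep mid) (mid, mid, c)).2.2 ≥ mid) ↔ (consume mid 'c' c xs).isSome := by
  induction xs generalizing c with
  | nil =>
    simp only [List.foldl_nil, consume]
    by_cases h : c < mid <;> simp [h] <;> omega
  | cons y t ih =>
    by_cases h : c < mid
    · rw [consume]
      simp only [List.foldl_cons, checkStep, h, if_pos]
      have : ¬ mid < mid := lt_irrefl mid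
      by_cases hy : y == 'c' <;> simp [hy] <;>
        [exact ih (c + 1) (by omega); exact ih c hc]
    · rw [consume]
      simp only [List.foldl_cons, checkStep, h, if_false]
      have : ¬ mid < mid := lt_irrefl mid
      simp only [this, if_false]
      rw [ih c hc, consume.eq_def]
      simp [h]

-- Phase B: with a saturated and c = 0, A's fold reaches c ≥ mid iff consume 'b' succeeds
-- and the fold on the rest (with b saturated) does.
theorem phaseB (mid : Int) (xs : List Char) (b : Int) (hb : b ≤ mid) (hm : 0 < mid) :
    ((xs.foldl (checkStep mid) (mid, b, 0)).2.2 ≥ mid) ↔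
      (consume mid 'b' b xs).elim False
        (fun rest => (rest.foldl (checkStep mid) (mid, mid, 0)).2.2 ≥ mid) := by
  induction xs generalizing b with
  | nil =>
    rw [consume]
    by_cases h : b < mid
    · simp [h]; omega
    · have : b = mid := by omega
      simp [this]
  | cons y t ih =>
    have hmm : ¬ mid < mid := lt_irrefl mid
    by_cases h : b < mid
    · rw [consume]
      simp only [List.foldl_cons, checkStep, hmm, if_false, h, if_pos]
      by_cases hy : y == 'b' <;> simp only [hy, if_pos] <;>
        [exact ih (b + 1) (by omega); exact ih b hb]
    · have : b = mid := by omega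
      subst this
      rw [consume]
      simp only [h, if_false, Option.elim_some]

-- Phase A: from the initial state, A's fold reaches c ≥ mid iff consume 'a' succeeds and
-- the fold on the rest (with a saturated) does.
theorem phaseA (mid : Int) (xs : List Char) (a : Int) (ha : a ≤ mid) (hm : 0 < mid) :
    ((xs.foldl (checkStep mid) (a, 0, 0)).2.2 ≥ mid) ↔
      (consume mid 'a' a xs).elim False
        (fun rest => (rest.foldl (checkStep mid) (mid, 0, 0)).2.2 ≥ mid) := by
  induction xs generalizing a with
  | nil =>
    rw [consume]
    by_cases h : a < mid
    · simp [h]; omega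
    · have : a = mid := by omega
      simp [this]
  | cons y t ih =>
    by_cases h : a < mid
    · rw [consume]
      simp only [List.foldl_cons, checkStep, h, if_pos]
      by_cases hy : y == 'a' <;> simp only [hy, if_pos] <;>
        [exact ih (a + 1) (by omega); exact ih a ha]
    · have : a = mid := by omega
      subst this
      rw [consume]
      simp only [h, if_false, Option.elim_some]

-- With mid ≤ 0, A's step never changes the state.
theorem fold_trivial (mid : Int) (xs : List Char) (hm : mid ≤ 0) :
    xs.foldl (checkStep mid) (0, 0, 0) = ((0 : Int), (0 : Int), (0 : Int)) := by
  induction xs with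
  | nil => rfl
  | cons y t ih =>
    have h : ¬ (0 : Int) < mid := by omega
    simp only [List.foldl_cons, checkStep, h, if_false]
    exact ih

-- consume succeeds exactly when enough occurrences remain.
theorem consume_isSome (mid : Int) (ch : Char) (xs : List Char) (c : Int) :
    (consume mid ch c xs).isSome ↔ mid ≤ c + (xs.count ch : Int) := by
  induction xs generalizing c with
  | nil =>
    rw [consume]
    by_cases h : c < mid <;> simp [h] <;> omega
  | cons y t ih =>
    rw [consume]
    by_cases h : c < mid
    · simp only [h, if_pos]
      by_cases hy : y == ch <;>
        simp [hy, ih, List.count_cons, show (y = ch) ↔ (y == ch) = true from (beq_iff_eq).symm] <;>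
        push_cast <;> omega
    · have : (0:Int) ≤ (List.count ch (y :: t) : Int) := by positivity
      simp [h]; omega

-- consume lands exactly at the least index where the running count reaches mid.
theorem consume_some (mid : Int) (ch : Char) (xs : List Char) (c : Int) (k : Nat)
    (hk : k ≤ xs.length)
    (hlt : ∀ j : Nat, j < k → c + ((xs.take j).count ch : Int) < mid)
    (hge : mid ≤ c + ((xs.take k).count ch : Int)) :
    consume mid ch c xs = some (xs.drop k) := by
  induction xs generalizing c k with
  | nil =>
    have hk0 : k = 0 := by simpa using hk
    subst hk0
    rw [consume]
    simp at hge ⊢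
    omega
  | cons y t ih =>
    cases k with
    | zero =>
      rw [consume]
      simp at hge
      have : ¬ c < mid := by omega
      simp [this]
    | succ k' =>
      have h0 := hlt 0 (Nat.succ_pos _)
      simp at h0
      rw [consume]
      simp only [h0, if_pos]
      have step : ∀ j : Nat, ((List.take (j+1) (y :: t)).count ch : Int)
          = (if y == ch then (1:Int) else 0) + ((t.take j).count ch : Int) := by
        intro j
        by_cases hy : y == ch <;>
          simp [List.count_cons, show (y = ch) ↔ (y == ch) = true from (beq_iff_eq).symm, hy] <;>
          push_cast <;> ring
      have := ih (if y == ch then c + 1 else c) k' (by simpa using hk)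
        (fun j hj => by
          have := hlt (j+1) (by omega)
          rw [step j] at this
          by_cases hy : y == ch <;> simp [hy] at this ⊢ <;> omega)
        (by
          rw [step k'] at hge
          by_cases hy : y == ch <;> simp [hy] at hge ⊢ <;> omega)
      simpa using this

-- Prefix-count list: entry k is the number of ch in the first k characters.
def prefList (ch : Char) (xs : List Char) : List Int :=
  (List.range (xs.length + 1)).map (fun k => ((xs.take k).count ch : Int))

theorem prefList_length (ch : Char) (xs : List Char) :
    (prefList ch xs).length = xs.length + 1 := by
  simp [prefList]

theorem prefList_getD (ch : Char) (xs : List Char) (k : Nat) (hk : k ≤ xs.length) :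
    (prefList ch xs).getD k 0 = ((xs.take k).count ch : Int) := by
  simp [prefList, List.getD_eq_getElem?_getD, List.getElem?_map, List.getElem?_range,
    Nat.lt_succ_of_le hk]

theorem count_take_mono (ch : Char) (xs : List Char) (a b : Nat) (hab : a ≤ b) :
    (xs.take a).count ch ≤ (xs.take b).count ch := by
  have : xs.take b = xs.take a ++ (xs.drop a).take (b - a) := by
    rw [← List.take_add]
    congr 1
    omega
  rw [this, List.count_append]
  omega

theorem prefList_mono (ch : Char) (xs : List Char) (a b : Nat) (hab : a ≤ b)
    (hb : b < (prefList ch xs).length) :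
    (prefList ch xs).getD a 0 ≤ (prefList ch xs).getD b 0 := by
  rw [prefList_length] at hb
  rw [prefList_getD ch xs a (by omega), prefList_getD ch xs b (by omega)]
  exact_mod_cast count_take_mono ch xs a b hab

theorem prefList_nonneg (ch : Char) (xs : List Char) (k : Nat) (hk : k ≤ xs.length) :
    0 ≤ (prefList ch xs).getD k 0 := by
  rw [prefList_getD ch xs k hk]
  positivity

-- The binary-search loop returns the least in-window index whose entry reaches t.
theorem lowerAux_char (pref : List Int) (t : Int)
    (mono : ∀ a b : Nat, a ≤ b → b < pref.length → pref.getD a 0 ≤ pref.getD b 0) :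
    ∀ (d : Nat) (lo hi : Int), (hi - lo).toNat = d → 0 ≤ lo → lo ≤ hi →
      hi ≤ (pref.length : Int) →
      lo ≤ lowerAux pref t lo hi ∧ lowerAux pref t lo hi ≤ hi ∧
      (∀ k : Nat, lo ≤ (k : Int) → (k : Int) < lowerAux pref t lo hi → pref.getD k 0 < t) ∧
      (lowerAux pref t lo hi < hi → t ≤ pref.getD (lowerAux pref t lo hi).toNat 0) := by
  intro d
  induction d using Nat.strong_induction_on with
  | _ d IH =>
    intro lo hi hd h0 hlh hhl
    rw [lowerAux]
    by_cases h : lo < hi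
    · simp only [h, dif_pos]
      set m := PySem.Int.floordiv (lo + hi) 2 with hm
      have hmlo : lo ≤ m := by
        have := PySem.Int.le_floordiv_iff_mul_le (a := lo + hi) (q := lo) (b := 2) (by omega)
        omega
      have hmhi : m < hi := by
        have := PySem.Int.floordiv_lt_iff_lt_mul (a := lo + hi) (q := hi) (b := 2) (by omega)
        omega
      have hget : (PySem.List.pyGet? pref m).getD 0 = pref.getD m.toNat 0 := by
        rw [PySem.List.pyGet?_of_nonneg pref (show (0:Int) ≤ m by omega),
          List.getD_eq_getElem?_getD]
      simp only [ge_iff_le, hget]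
      by_cases hb : t ≤ pref.getD m.toNat 0
      · simp only [hb, if_pos]
        obtain ⟨h1, h2, h3, h4⟩ := IH (m - lo).toNat (by omega) lo m rfl h0 hmlo (by omega)
        refine ⟨h1, by omega, h3, ?_⟩
        intro hlt
        rcases lt_or_eq_of_le h2 with hc | hc
        · exact h4 hc
        · rw [hc]
          exact hb
      · simp only [hb, if_neg, if_false]
        obtain ⟨h1, h2, h3, h4⟩ := IH (hi - (m + 1)).toNat (by omega) (m + 1) hi rfl (by omega)
          (by omega) hhl
        refine ⟨by omega, h2, ?_, h4⟩
        intro k hk1 hk2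
        by_cases hkm : (k : Int) ≤ m
        · have hmono : pref.getD k 0 ≤ pref.getD m.toNat 0 := by
            apply mono _ _ (by omega) (by omega)
          omega
        · exact h3 k (by omega) hk2
    · simp only [h, dif_neg, not_false_iff]
      exact ⟨le_refl _, by omega, fun k hk1 hk2 => by omega, fun hlt => hlt.elim⟩

-- B's prefix-building fold computes the three prefix-count lists.
theorem prefStep_app (p : List Char) (ch : Char) :
    prefStep (prefList 'a' p, prefList 'b' p, prefList 'c' p) ch
      = (prefList 'a' (p ++ [ch]), prefList 'b' (p ++ [ch]), prefList 'c' (p ++ [ch])) := by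
  have key : ∀ c : Char, prefList c (p ++ [ch])
      = prefList c p ++ [(((p ++ [ch]).count c : Nat) : Int)] := by
    intro c
    simp only [prefList, List.length_append, List.length_singleton]
    rw [show p.length + 1 + 1 = (p.length + 1) + 1 from rfl, List.range_succ, List.map_append]
    congr 1
    · apply List.map_congr_left
      intro k hk
      simp only [List.mem_range] at hk
      rw [List.take_append_of_le_length (by omega)]
    · simp [List.take_of_length_le]
  have last : ∀ c : Char, (PySem.List.pyGet? (prefList c p) (-1)).getD 0 = ((p.count c : Nat) : Int) := by
    intro c
    have : prefList c p
        = (List.range p.length).map (fun k => (((p.take k).count c : Nat) : Int))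
          ++ [((p.count c : Nat) : Int)] := by
      simp [prefList, List.range_succ, List.take_of_length_le]
    rw [this, PySem.List.pyGet?_neg_one_append_singleton]
    rfl
  have cnt : ∀ c : Char, (((p ++ [ch]).count c : Nat) : Int)
      = ((p.count c : Nat) : Int) + (if ch == c then (1:Int) else 0) := by
    intro c
    rw [List.count_append]
    by_cases hy : ch = c
    · subst hy
      simp
    · simp [hy, beq_iff_eq]
  simp only [prefStep, key, last, cnt]

theorem build_pref (xs : List Char) :
    xs.foldl prefStep ([0], [0], [0]) = (prefList 'a' xs, prefList 'b' xs, prefList 'c' xs) := by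
  suffices h : ∀ (p : List Char),
      xs.foldl prefStep (prefList 'a' p, prefList 'b' p, prefList 'c' p)
        = (prefList 'a' (p ++ xs), prefList 'b' (p ++ xs), prefList 'c' (p ++ xs)) by
    have := h []
    simpa [show prefList 'a' [] = [0] from rfl, show prefList 'b' [] = [0] from rfl,
      show prefList 'c' [] = [0] from rfl] using this
  induction xs with
  | nil => intro p; simp
  | cons y t ih =>
    intro p
    rw [List.foldl_cons, prefStep_app, ih (p ++ [y])]
    simp

-- count over a middle segment, in Int form.
theorem count_seg (ch : Char) (xs : List Char) (i j : Nat) (hij : i ≤ j) :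
    (((xs.drop i).take (j - i)).count ch : Int)
      = ((xs.take j).count ch : Int) - ((xs.take i).count ch : Int) := by
  have : xs.take j = xs.take i ++ (xs.drop i).take (j - i) := by
    rw [← List.take_add]
    congr 1
    omega
  rw [this, List.count_append]
  push_cast
  ring

theorem count_drop (ch : Char) (xs : List Char) (j : Nat) (hj : j ≤ xs.length) :
    ((xs.drop j).count ch : Int) = ((xs.take xs.length).count ch : Int) - ((xs.take j).count ch : Int) := by
  have h := count_seg ch xs j xs.length hj
  rw [List.take_of_length_le (by simp)] at h
  exact h

-- A's fold equals B's prefix-array/binary-search computation, at the list level.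
theorem check_eq_aux (mid : Int) (xs : List Char) :
    decide ((xs.foldl (checkStep mid) (0, 0, 0)).2.2 ≥ mid)
      = (if lower (prefList 'a' xs) mid > (xs.length : Int) then false
         else if lower (prefList 'b' xs)
              ((PySem.List.pyGet? (prefList 'b' xs) (lower (prefList 'a' xs) mid)).getD 0 + mid)
              > (xs.length : Int) then false
         else decide ((PySem.List.pyGet? (prefList 'c' xs) (xs.length : Int)).getD 0
              - (PySem.List.pyGet? (prefList 'c' xs)
                  (lower (prefList 'b' xs)
                    ((PySem.List.pyGet? (prefList 'b' xs) (lower (prefList 'a' xs) mid)).getD 0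
                      + mid))).getD 0 ≥ mid)) := by
  have monoP : ∀ ch : Char, ∀ a b : Nat, a ≤ b → b < (prefList ch xs).length →
      (prefList ch xs).getD a 0 ≤ (prefList ch xs).getD b 0 :=
    fun ch a b h1 h2 => prefList_mono ch xs a b h1 h2
  set N : Int := (xs.length : Int) with hN
  have hlen : ∀ ch : Char, PySem.List.len (prefList ch xs) = N + 1 := by
    intro ch
    rw [PySem.List.len_eq, prefList_length]
    push_cast
    ring
  have hlen' : ∀ ch : Char, N + 1 ≤ ((prefList ch xs).length : Int) := by
    intro ch
    rw [prefList_length]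
    push_cast
    omega
  have getP : ∀ (ch : Char) (v : Int), 0 ≤ v → v ≤ N →
      (PySem.List.pyGet? (prefList ch xs) v).getD 0 = (prefList ch xs).getD v.toNat 0 := by
    intro ch v h0 hv
    rw [PySem.List.pyGet?_of_nonneg (prefList ch xs) h0, List.getD_eq_getElem?_getD]
  have hN0 : 0 ≤ N := by positivity
  simp only [lower, hlen]
  obtain ⟨hi0, hi1, hi2, hi3⟩ := lowerAux_char (prefList 'a' xs) mid (monoP 'a')
    ((N + 1 - 0).toNat) 0 (N + 1) rfl le_rfl (by omega) (hlen' 'a')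
  set i := lowerAux (prefList 'a' xs) mid 0 (N + 1) with hidef
  by_cases hm : 0 < mid
  · by_cases hiBig : i > N
    · -- not enough 'a's in the whole string
      have hcnt : (xs.count 'a' : Int) < mid := by
        have hup := hi2 xs.length (by positivity) (by omega)
        rw [prefList_getD 'a' xs xs.length le_rfl, List.take_length] at hup
        exact hup
      have hcons : consume mid 'a' 0 xs = none := by
        rw [← Option.not_isSome_iff_eq_none, consume_isSome]
        omega
      rw [if_pos hiBig]
      apply decide_eq_false
      rw [phaseA mid xs 0 (by omega) hm, hcons]
      simp
    · -- phase 'a' succeeds at index i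
      have hile : i ≤ N := by omega
      have hconsA : consume mid 'a' 0 xs = some (xs.drop i.toNat) := by
        apply consume_some mid 'a' xs 0 i.toNat (by omega)
        · intro j hj
          have hup := hi2 j (by positivity) (by omega)
          rw [prefList_getD 'a' xs j (by omega)] at hup
          omega
        · have hup := hi3 (by omega)
          rw [prefList_getD 'a' xs i.toNat (by omega)] at hup
          omega
      rw [if_neg hiBig]
      have hgetb := getP 'b' i (by omega) (by omega)
      simp only [hgetb]
      set t2 := (prefList 'b' xs).getD i.toNat 0 + mid with ht2
      obtain ⟨hj0, hj1, hj2, hj3⟩ := lowerAux_char (prefList 'b' xs) t2 (monoP 'b')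
        ((N + 1 - 0).toNat) 0 (N + 1) rfl le_rfl (by omega) (hlen' 'b')
      set j := lowerAux (prefList 'b' xs) t2 0 (N + 1) with hjdef
      have hrestlen : (xs.drop i.toNat).length = xs.length - i.toNat := by
        simp
      by_cases hjBig : j > N
      · -- not enough 'b's after position i
        have hcnt : ((xs.drop i.toNat).count 'b' : Int) < mid := by
          rw [count_drop 'b' xs i.toNat (by omega), List.take_length]
          have hup := hj2 xs.length (by positivity) (by omega)
          rw [prefList_getD 'b' xs xs.length le_rfl, List.take_length] at hup
          have hfb := prefList_getD 'b' xs i.toNat (by omega)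
          omega
        have hcons : consume mid 'b' 0 (xs.drop i.toNat) = none := by
          rw [← Option.not_isSome_iff_eq_none, consume_isSome]
          omega
        rw [if_pos hjBig]
        apply decide_eq_false
        rw [phaseA mid xs 0 (by omega) hm, hconsA]
        simp only [Option.elim_some]
        rw [phaseB mid (xs.drop i.toNat) 0 (by omega) hm, hcons]
        simp
      · -- phase 'b' succeeds at index j
        have hjle : j ≤ N := by omega
        have hij : i ≤ j := by
          by_contra hc
          have h1 := hj3 (by omega)
          have h2 := monoP 'b' j.toNat i.toNat (by omega)
            (by rw [prefList_length]; omega)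
          omega
        have hconsB : consume mid 'b' 0 (xs.drop i.toNat) = some (xs.drop j.toNat) := by
          have hdd : (xs.drop i.toNat).drop (j.toNat - i.toNat) = xs.drop j.toNat := by
            rw [List.drop_drop]
            congr 1
            omega
          rw [← hdd]
          apply consume_some mid 'b' (xs.drop i.toNat) 0 (j.toNat - i.toNat)
            (by rw [hrestlen]; omega)
          · intro jj hjj
            have hseg := count_seg 'b' xs i.toNat (i.toNat + jj) (by omega)
            rw [show i.toNat + jj - i.toNat = jj from by omega] at hseg
            rw [hseg]
            have hup := hj2 (i.toNat + jj) (by positivity) (by push_cast; omega)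
            rw [prefList_getD 'b' xs (i.toNat + jj) (by omega)] at hup
            have hfb := prefList_getD 'b' xs i.toNat (by omega)
            omega
          · have hseg := count_seg 'b' xs i.toNat j.toNat (by omega)
            rw [hseg]
            have hup := hj3 (by omega)
            rw [prefList_getD 'b' xs j.toNat (by omega)] at hup
            have hfb := prefList_getD 'b' xs i.toNat (by omega)
            omega
        rw [if_neg hjBig]
        have hcnt : ((xs.drop j.toNat).count 'c' : Int)
            = (prefList 'c' xs).getD N.toNat 0 - (prefList 'c' xs).getD j.toNat 0 := by
          rw [count_drop 'c' xs j.toNat (by omega)]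
          rw [← prefList_getD 'c' xs xs.length le_rfl, ← prefList_getD 'c' xs j.toNat (by omega)]
          have hNt : N.toNat = xs.length := by omega
          rw [hNt]
        simp only [getP 'c' N hN0 le_rfl, getP 'c' j (by omega) (by omega)]
        rw [decide_eq_decide]
        rw [phaseA mid xs 0 (by omega) hm, hconsA]
        simp only [Option.elim_some]
        rw [phaseB mid (xs.drop i.toNat) 0 (by omega) hm, hconsB]
        simp only [Option.elim_some]
        rw [phaseC mid (xs.drop j.toNat) 0 (by omega), consume_isSome]
        omega
  · -- mid ≤ 0: A's counters never move and B's searches stop at index 0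
    rw [fold_trivial mid xs (by omega)]
    have hnn : ∀ (ch : Char) (k : Nat), k ≤ xs.length → 0 ≤ (prefList ch xs).getD k 0 :=
      fun ch k hk => prefList_nonneg ch xs k hk
    have hi00 : i = 0 := by
      by_contra hc
      have h1 := hi2 0 le_rfl (by omega)
      have h2 := hnn 'a' 0 (by omega)
      omega
    have hB0 : (prefList 'b' xs).getD ((0 : Int)).toNat 0 = 0 := by
      rw [show ((0 : Int)).toNat = 0 from rfl, prefList_getD 'b' xs 0 (by omega)]
      simp
    rw [hi00, if_neg (by omega)]
    simp only [getP 'b' 0 le_rfl hN0, hB0]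
    obtain ⟨hj0, hj1, hj2, hj3⟩ := lowerAux_char (prefList 'b' xs) (0 + mid) (monoP 'b')
      ((N + 1 - 0).toNat) 0 (N + 1) rfl le_rfl (by omega) (hlen' 'b')
    set j := lowerAux (prefList 'b' xs) (0 + mid) 0 (N + 1) with hjdef
    have hj00 : j = 0 := by
      by_contra hc
      have h1 := hj2 0 le_rfl (by omega)
      have h2 := hnn 'b' 0 (by omega)
      omega
    rw [hj00, if_neg (by omega)]
    have hC0 : (prefList 'c' xs).getD ((0 : Int)).toNat 0 = 0 := by
      rw [show ((0 : Int)).toNat = 0 from rfl, prefList_getD 'c' xs 0 (by omega)]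
      simp
    have hCn : 0 ≤ (prefList 'c' xs).getD N.toNat 0 := hnn 'c' N.toNat (by omega)
    simp only [getP 'c' N hN0 le_rfl, getP 'c' 0 le_rfl hN0, hC0]
    change decide ((0 : Int) ≥ mid) = _
    rw [decide_eq_decide]
    omega

-- ===== VERDICT (by name: the statement is the Claim_ definition above) =====
theorem check_spec : Claim_equal_check := by
  intro mid x _
  unfold Spec_check check check_alt
  simp only [PySem.List.len_eq, build_pref]
  exact check_eq_aux mid x.toList
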